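-- pv_equiv track=rewrite | github.com/Connor-OS/AoC | 2024/day_9.py | construct_objects
-- ===== SOURCE A (Python) =====
-- def construct_objects(files, gaps):
--     # file: (file_id, start, length)
--     # gap: (start, end)
--     file_id, start = 0, 0
--     file_objects, gap_objects = [], []
--     for f, g in zip(files, gaps + [1]):
--         file_objects.append((file_id, start, f))
--         start += f
--         gap_objects.append((start, start + g))
--         start += g
--         file_id += 1
--
--     return file_objects, gap_objects
-- ===== SOURCE B (Python) =====
-- def construct_objects(files, gaps):
--     # file: (file_id, start, length)
--     # gap: (start, end)
--     paired = list(zip(files, gaps + [1]))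
--     # prefix-sum table: start offset of each file
--     starts = []
--     acc = 0
--     for f, g in paired:
--         starts.append(acc)
--         acc += f + g
--     file_objects = [(i, s, f) for i, (s, (f, _g)) in enumerate(zip(starts, paired))]
--     gap_objects = [(s + f, s + f + g) for s, (f, g) in zip(starts, paired)]
--     return file_objects, gap_objects
-- ===== Notes on version B (the rewrite author's own statement) =====
-- stated objective: alternative
-- what changed: A builds both output lists inside one inline-accumulating loop; B first builds a prefix-sum table of start offsets in one pass and then derives file_objects and gap_objects by two separate comprehensions over that table.
import Mathlib
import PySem

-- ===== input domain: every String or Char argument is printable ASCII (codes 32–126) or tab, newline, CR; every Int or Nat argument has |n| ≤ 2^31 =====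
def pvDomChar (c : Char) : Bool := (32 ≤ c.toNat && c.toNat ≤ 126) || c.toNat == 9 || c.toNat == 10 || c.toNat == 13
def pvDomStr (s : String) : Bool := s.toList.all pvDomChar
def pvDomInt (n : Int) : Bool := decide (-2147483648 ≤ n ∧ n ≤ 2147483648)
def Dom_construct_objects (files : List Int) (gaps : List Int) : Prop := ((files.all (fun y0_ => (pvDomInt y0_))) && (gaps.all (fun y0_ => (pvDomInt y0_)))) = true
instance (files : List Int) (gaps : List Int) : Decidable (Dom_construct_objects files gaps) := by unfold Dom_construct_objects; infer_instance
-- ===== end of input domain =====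

-- B replaces A's single inline-accumulating loop by a prefix-sum table of start
-- offsets followed by two separate comprehensions (objective: alternative decomposition).

-- ===== PORT A =====
-- literal port of A: one fold over zip(files, gaps + [1]) carrying (file_id, start, file_objects, gap_objects)
def construct_objects (files : List Int) (gaps : List Int) : (List (Int × Int × Int)) × (List (Int × Int)) :=
  let r := (files.zip (gaps ++ [1])).foldl
    (fun (st : Int × Int × List (Int × Int × Int) × List (Int × Int)) fg =>
      (st.1 + 1,
       st.2.1 + fg.1 + fg.2,
       st.2.2.1 ++ [(st.1, st.2.1, fg.1)],
       st.2.2.2 ++ [(st.2.1 + fg.1, st.2.1 + fg.1 + fg.2)]))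
    (0, 0, [], [])
  (r.2.2.1, r.2.2.2)

-- ===== PORT B =====
-- B's prefix-sum pass: collect the running offset before each (f, g) pair
def pvStartsFold (paired : List (Int × Int)) : List Int :=
  (paired.foldl (fun (s : List Int × Int) fg => (s.1 ++ [s.2], s.2 + (fg.1 + fg.2))) ([], 0)).1

def construct_objects_alt (files : List Int) (gaps : List Int) : (List (Int × Int × Int)) × (List (Int × Int)) :=
  let paired := files.zip (gaps ++ [1])
  let starts := pvStartsFold paired
  let file_objects := (PySem.List.enumerate (starts.zip paired) 0).map
    (fun p => (p.1, p.2.1, p.2.2.1))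
  let gap_objects := (starts.zip paired).map
    (fun p => (p.1 + p.2.1, p.1 + p.2.1 + p.2.2))
  (file_objects, gap_objects)

-- ===== PRECONDITION & SPEC =====
def Spec_construct_objects (files : List Int) (gaps : List Int) (out : (List (Int × Int × Int)) × (List (Int × Int))) : Prop := out = construct_objects_alt files gaps
instance (files : List Int) (gaps : List Int) (out : (List (Int × Int × Int)) × (List (Int × Int))) : Decidable (Spec_construct_objects files gaps out) := by unfold Spec_construct_objects; infer_instance

-- ===== CLAIM (what is proved, stated in full; the proofs are below) =====
def Claim_equal_construct_objects : Prop := ∀ (files : List Int) (gaps : List Int), Dom_construct_objects files gaps → Spec_construct_objects files gaps (construct_objects files gaps)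

-- ===== LEMMAS AND PROOFS =====

-- recursive characterisations of the two output lists, used to relate both ports
def fileL (fid start : Int) : List (Int × Int) → List (Int × Int × Int)
  | [] => []
  | (f, g) :: t => (fid, start, f) :: fileL (fid + 1) (start + f + g) t

def gapL (start : Int) : List (Int × Int) → List (Int × Int)
  | [] => []
  | (f, g) :: t => (start + f, start + f + g) :: gapL (start + f + g) t

def startsL (acc : Int) : List (Int × Int) → List Int
  | [] => []
  | (f, g) :: t => acc :: startsL (acc + f + g) t

theorem foldA (zs : List (Int × Int)) : ∀ (fid start : Int)
    (fo : List (Int × Int × Int)) (go : List (Int × Int)),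
    (zs.foldl
      (fun (st : Int × Int × List (Int × Int × Int) × List (Int × Int)) fg =>
        (st.1 + 1, st.2.1 + fg.1 + fg.2,
         st.2.2.1 ++ [(st.1, st.2.1, fg.1)],
         st.2.2.2 ++ [(st.2.1 + fg.1, st.2.1 + fg.1 + fg.2)]))
      (fid, start, fo, go)).2.2
    = (fo ++ fileL fid start zs, go ++ gapL start zs) := by
  induction zs with
  | nil => simp [fileL, gapL]
  | cons z t ih =>
    intro fid start fo go
    obtain ⟨f, g⟩ := z
    simp only [List.foldl_cons]
    rw [ih]
    simp [fileL, gapL, List.append_assoc]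

theorem foldS (zs : List (Int × Int)) : ∀ (acc : Int) (pre : List Int),
    (zs.foldl (fun (s : List Int × Int) fg => (s.1 ++ [s.2], s.2 + (fg.1 + fg.2))) (pre, acc)).1
    = pre ++ startsL acc zs := by
  induction zs with
  | nil => simp [startsL]
  | cons z t ih =>
    intro acc pre
    obtain ⟨f, g⟩ := z
    simp only [List.foldl_cons]
    rw [ih]
    simp [startsL, List.append_assoc, add_assoc]

theorem pvStartsFold_eq (zs : List (Int × Int)) : pvStartsFold zs = startsL 0 zs := by
  unfold pvStartsFold; simpa using foldS zs 0 []

theorem fileB (zs : List (Int × Int)) : ∀ (fid acc : Int),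
    (PySem.List.enumerate ((startsL acc zs).zip zs) fid).map (fun p => (p.1, p.2.1, p.2.2.1))
    = fileL fid acc zs := by
  induction zs with
  | nil => simp [startsL, fileL, PySem.List.enumerate_nil]
  | cons z t ih =>
    intro fid acc
    obtain ⟨f, g⟩ := z
    simp [startsL, fileL, PySem.List.enumerate_cons, ih]

theorem gapB (zs : List (Int × Int)) : ∀ (acc : Int),
    ((startsL acc zs).zip zs).map (fun p => (p.1 + p.2.1, p.1 + p.2.1 + p.2.2))
    = gapL acc zs := by
  induction zs with
  | nil => simp [startsL, gapL]
  | cons z t ih =>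
    intro acc
    obtain ⟨f, g⟩ := z
    simp [startsL, gapL, ih]

-- ===== VERDICT (by name: the statement is the Claim_ definition above) =====
theorem construct_objects_spec : Claim_equal_construct_objects := by
  intro files gaps _
  simp only [Spec_construct_objects, construct_objects, construct_objects_alt]
  rw [pvStartsFold_eq, foldA, fileB, gapB]
  simp
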